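-- pv_equiv track=rewrite | github.com/cookienc/Java | 백준/src/programmers/BestSet.py | solution
-- ===== SOURCE A (Python) =====
-- none = [-1]
--
-- def solution(n, s):
--     quotient = s // n
--     answer = []
--     if quotient != 0:
--         for _ in range(n):
--             answer.append(quotient)
--         remainder = s % n
--         for i in range(remainder):
--             answer[i] += 1
--     answer.sort()
--
--     return answer if answer else none
-- ===== SOURCE B (Python) =====
-- def solution(n, s):
--     if s // n == 0:
--         return [-1]
--     return [(s + i) // n for i in range(n)]
-- ===== Notes on version B (the rewrite author's own statement) =====
-- stated objective: simpler
-- what changed: B computes each element of the sorted answer directly by the closed form (s+i)//n for i in range(n), eliminating A's fill loop, per-index increment loop and final sort; Pre_ restricts to positive n, the task's natural domain (n counts the parts): n=0 raises ZeroDivisionError in A, and for n<0 A's [-1] comes only from its vacuously empty loops while B returns [].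
-- outside the precondition, e.g. on solution(-2, 5): A returns [-1], B returns []
import Mathlib
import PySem

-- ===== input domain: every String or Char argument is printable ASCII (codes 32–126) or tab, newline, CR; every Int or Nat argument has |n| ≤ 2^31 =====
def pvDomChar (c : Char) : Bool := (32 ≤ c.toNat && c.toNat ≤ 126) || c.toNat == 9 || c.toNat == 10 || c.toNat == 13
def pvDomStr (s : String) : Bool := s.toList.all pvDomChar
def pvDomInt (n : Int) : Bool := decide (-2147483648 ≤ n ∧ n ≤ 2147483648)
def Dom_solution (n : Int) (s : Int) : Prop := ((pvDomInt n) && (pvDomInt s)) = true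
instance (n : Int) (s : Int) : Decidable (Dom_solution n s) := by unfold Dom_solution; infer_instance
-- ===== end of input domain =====

-- B builds the already-sorted answer element-wise by the closed form (s+i)//n, with no
-- fill loop, increment loop or sort (objective: simpler).


-- ===== PORT A =====
def solution (n : Int) (s : Int) : List Int :=
  let quotient := PySem.Int.floordiv s n
  let answer : List Int :=
    if quotient ≠ 0 then
      -- for _ in range(n): answer.append(quotient)
      let answer := (PySem.List.pyRange 0 n 1).foldl (fun acc _ => acc ++ [quotient]) []
      let remainder := PySem.Int.mod s n
      -- for i in range(remainder): answer[i] += 1   (in range on every admitted input, so List.set is exact here)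
      (PySem.List.pyRange 0 remainder 1).foldl
        (fun acc i => acc.set i.toNat (PySem.List.pyGetD acc i 0 + 1)) answer
    else []
  let answer := PySem.List.sorted answer (fun x => x) false
  if answer ≠ [] then answer else [-1]

-- ===== PORT B =====
def solution_alt (n : Int) (s : Int) : List Int :=
  if PySem.Int.floordiv s n = 0 then [-1]
  else (PySem.List.pyRange 0 n 1).map (fun i => PySem.Int.floordiv (s + i) n)

-- ===== PRECONDITION & SPEC =====
-- Pre_ restricts to positive n, the task's natural domain (n counts the parts): at n = 0
-- Python A raises ZeroDivisionError, and for n < 0 A's [-1] is an accident of its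
-- vacuously empty range(n) loops (B returns [] there).
def Pre_solution (n : Int) (s : Int) : Prop := 0 < n
instance (n : Int) (s : Int) : Decidable (Pre_solution n s) := by unfold Pre_solution; infer_instance
def pvWitness_solution : Int × Int := (3, 11)

def Spec_solution (n : Int) (s : Int) (out : List Int) : Prop := out = solution_alt n s
instance (n : Int) (s : Int) (out : List Int) : Decidable (Spec_solution n s out) := by unfold Spec_solution; infer_instance

-- ===== CLAIM (what is proved, stated in full; the proofs are below) =====
def Claim_equal_solution : Prop := ∀ (n : Int) (s : Int), Dom_solution n s → Pre_solution n s → Spec_solution n s (solution n s)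

-- ===== LEMMAS AND PROOFS =====

-- A's increment loop, run on replicate m q, bumps exactly the first r entries
theorem pv_inc_loop (q : Int) (r m : Nat) (h : r ≤ m) :
    (PySem.List.pyRange 0 (r : Int) 1).foldl
      (fun acc i => acc.set i.toNat (PySem.List.pyGetD acc i 0 + 1)) (List.replicate m q)
    = List.replicate r (q + 1) ++ List.replicate (m - r) q := by
  induction r with
  | zero => simp [PySem.List.pyRange]
  | succ k ih =>
    have hk : (0:Int) ≤ (k:Int) := by positivity
    have hc : ((k+1 : Nat) : Int) = (k : Int) + 1 := by push_cast; ring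
    rw [hc, PySem.List.pyRange_one_succ_right hk, List.foldl_append]
    rw [ih (by omega)]
    simp only [List.foldl_cons, List.foldl_nil]
    have hlen : (List.replicate k (q+1) ++ List.replicate (m-k) q).length = m := by
      simp; omega
    have hget : PySem.List.pyGetD (List.replicate k (q+1) ++ List.replicate (m-k) q) (k : Int) 0 = q := by
      rw [PySem.List.pyGetD_eq_getElem _ _ hk (by rw [hlen]; exact_mod_cast by omega)]
      rw [List.getElem_append_right (by simp)]
      simp
    rw [hget]
    have htn : ((k:Int)).toNat = k := by omega
    rw [htn]
    have hmk : m - k = (m - (k+1)) + 1 := by omega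
    rw [hmk, List.replicate_succ, List.set_append]
    simp [List.replicate_succ' (n := k)]

theorem solution_spec_aux (n s : Int) (hpos : 0 < n) : solution n s = solution_alt n s := by
  by_cases hq : PySem.Int.floordiv s n = 0
  · -- quotient == 0: both return [-1]
    simp [solution, solution_alt, hq, PySem.List.sorted]
  · obtain ⟨m, hm⟩ : ∃ m : Nat, n = (m : Int) := ⟨n.toNat, by omega⟩
    have hm1 : 1 ≤ m := by omega
    set q := PySem.Int.floordiv s n with hqdef
    set r := PySem.Int.mod s n with hrdef
    have hr0 : 0 ≤ r := PySem.Int.mod_nonneg s hpos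
    have hrn : r < n := PySem.Int.mod_lt s hpos
    obtain ⟨rn, hrn'⟩ : ∃ rn : Nat, r = (rn : Int) := ⟨r.toNat, by omega⟩
    have hrm : rn ≤ m := by omega
    have hs : q * n + r = s := PySem.Int.floordiv_mul_add_mod s n
    -- A's first loop builds replicate m q
    have hfill : (PySem.List.pyRange 0 n 1).foldl (fun acc _ => acc ++ [q]) ([] : List Int)
        = List.replicate m q := by
      rw [hm, PySem.List.pyRange_zero_natCast,
          PySem.List.foldl_append_singleton_eq_map (fun _ => q)]
      simp [Function.comp_def, List.map_const']
    -- the final sort names the already-known order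
    have hsort : PySem.List.sorted (List.replicate rn (q+1) ++ List.replicate (m-rn) q)
          (fun x => x) false
        = List.replicate (m-rn) q ++ List.replicate rn (q+1) := by
      apply PySem.List.sorted_id_eq_of_perm_of_pairwise
      · exact List.perm_append_comm
      · rw [List.pairwise_append]
        refine ⟨List.pairwise_replicate.2 (by simp), List.pairwise_replicate.2 (by simp), ?_⟩
        intro a ha b hb
        rw [List.eq_of_mem_replicate ha, List.eq_of_mem_replicate hb]
        omega
    have hne : List.replicate (m-rn) q ++ List.replicate rn (q+1) ≠ [] := by
      intro hcon
      have := congrArg List.length hcon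
      simp at this
      omega
    have hA : solution n s = List.replicate (m-rn) q ++ List.replicate rn (q+1) := by
      simp only [solution, ← hqdef, ← hrdef, if_pos hq, ne_eq]
      rw [hfill, hrn', pv_inc_loop q rn m hrm, hsort, if_pos hne]
    -- B: each element of the map is q or q + 1 by the floor-division bracket
    have hB : solution_alt n s = List.replicate (m-rn) q ++ List.replicate rn (q+1) := by
      have hq' : ¬ PySem.Int.floordiv s ((m : Nat) : Int) = 0 := hm ▸ hq
      rw [solution_alt, hm, if_neg hq', PySem.List.pyRange_zero_natCast, List.map_map]
      apply List.ext_getElem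
      · simp; omega
      · intro i h1 h2
        simp only [List.length_map, List.length_range] at h1
        simp only [List.getElem_map, List.getElem_range, Function.comp_apply]
        have hqn : (q + 1) * n = q * n + n := by ring
        by_cases hi : i < m - rn
        · rw [List.getElem_append_left (by simp; omega)]
          rw [List.getElem_replicate]
          rw [← hm, PySem.Int.floordiv_eq_iff_of_pos hpos]
          constructor <;> [skip; rw [hqn]] <;> omega
        · rw [List.getElem_append_right (by simp; omega)]
          rw [List.getElem_replicate]
          rw [← hm, PySem.Int.floordiv_eq_iff_of_pos hpos]
          have hq2 : (q + 1 + 1) * n = q * n + n + n := by ring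
          constructor
          · rw [hqn]; omega
          · rw [hq2]; omega
    rw [hA, hB]

-- ===== VERDICT (by name: the statement is the Claim_ definition above) =====
theorem solution_spec : Claim_equal_solution := by
  intro n s _ hpre
  exact solution_spec_aux n s hpre
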